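-- pv_equiv track=rewrite | github.com/Chudopal/PythonDeveloperCheatSheet | Shops/travel_guide_store/app/main.py | summ_guide
-- ===== SOURCE A (Python) =====
-- from typing import List, Dict
--
-- def summ_guide(sum_list: List):
--     total_sum = 0
--     result = ""
--     for item in sum_list:
--         result += item[0] + "\n"
--         total_sum += item[1]
--         result += f"Сумма покупок в корзине составляет: {total_sum} BYN" + "\n"
--     return result
-- ===== SOURCE B (Python) =====
-- def summ_guide(sum_list):
--     # pass 1: running totals, kept separate from string construction
--     totals = []
--     run = 0
--     for _, amount in sum_list:
--         run += amount
--         totals.append(run)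
--     # pass 2: build one line-block per item and join
--     blocks = [
--         name + "\n" + "Сумма покупок в корзине составляет: " + str(t) + " BYN" + "\n"
--         for (name, _), t in zip(sum_list, totals)
--     ]
--     return "".join(blocks)
-- ===== Notes on version B (the rewrite author's own statement) =====
-- stated objective: idiomatic
-- what changed: Replaces the single interleaved loop mutating total_sum and result with two separate passes: a standalone prefix-sum pass producing totals, then a comprehension zipping items with totals joined by ''.join.
import Mathlib
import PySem

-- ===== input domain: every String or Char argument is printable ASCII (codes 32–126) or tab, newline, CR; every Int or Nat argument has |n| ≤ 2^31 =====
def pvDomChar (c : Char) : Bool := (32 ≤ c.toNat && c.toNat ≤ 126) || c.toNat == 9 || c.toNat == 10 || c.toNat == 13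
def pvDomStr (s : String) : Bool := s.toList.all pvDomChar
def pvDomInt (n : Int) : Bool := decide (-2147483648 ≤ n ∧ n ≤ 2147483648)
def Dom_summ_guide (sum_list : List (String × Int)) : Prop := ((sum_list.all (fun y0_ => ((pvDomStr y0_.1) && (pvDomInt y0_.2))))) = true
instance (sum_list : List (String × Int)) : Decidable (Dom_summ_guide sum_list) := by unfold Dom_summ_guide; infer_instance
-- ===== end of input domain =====

-- B separates the running-total computation (a standalone prefix-sum pass) from string
-- construction (a zip + join pass), instead of A's single loop interleaving both accumulators.


-- ===== PORT A =====
-- single loop carrying (total_sum, result), appending two pieces per item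
def summ_guide (sum_list : List (String × Int)) : String :=
  (sum_list.foldl
    (fun (st : Int × String) item =>
      let result := st.2 ++ item.1 ++ "\n"
      let total_sum := st.1 + item.2
      (total_sum,
        result ++ "Сумма покупок в корзине составляет: " ++ PySem.Int.toStr total_sum ++ " BYN" ++ "\n"))
    (0, "")).2

-- ===== PORT B =====
-- pass 1 of Source B: running totals
def pvTotals : List (String × Int) → Int → List Int
  | [], _ => []
  | (_, a) :: rest, run => (run + a) :: pvTotals rest (run + a)

-- pass 2 of Source B: one block per (item, total), then join
def pvBlock (p : (String × Int) × Int) : String :=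
  p.1.1 ++ "\n" ++ "Сумма покупок в корзине составляет: " ++ PySem.Int.toStr p.2 ++ " BYN" ++ "\n"

def summ_guide_alt (sum_list : List (String × Int)) : String :=
  String.join ((sum_list.zip (pvTotals sum_list 0)).map pvBlock)

-- ===== PRECONDITION & SPEC =====
def Spec_summ_guide (sum_list : List (String × Int)) (out : String) : Prop := out = summ_guide_alt sum_list
instance (sum_list : List (String × Int)) (out : String) : Decidable (Spec_summ_guide sum_list out) := by unfold Spec_summ_guide; infer_instance

-- ===== CLAIM (what is proved, stated in full; the proofs are below) =====
def Claim_equal_summ_guide : Prop := ∀ (sum_list : List (String × Int)), Dom_summ_guide sum_list → Spec_summ_guide sum_list (summ_guide sum_list)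

-- ===== LEMMAS AND PROOFS =====
theorem foldl_append_join (l : List String) (s : String) :
    l.foldl (fun r x => r ++ x) s = s ++ String.join l := by
  induction l generalizing s with
  | nil => simp [String.join]
  | cons h t ih =>
      rw [List.foldl_cons, ih]
      have hj : String.join (h :: t) = h ++ String.join t := by
        show List.foldl (fun r x => r ++ x) "" (h :: t) = _
        rw [List.foldl_cons, ih]; simp
      rw [hj, String.append_assoc]

theorem join_cons (h : String) (t : List String) :
    String.join (h :: t) = h ++ String.join t := by
  show List.foldl (fun r x => r ++ x) "" (h :: t) = _
  rw [List.foldl_cons, foldl_append_join]; simp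

theorem summ_guide_loop (l : List (String × Int)) (t : Int) (r : String) :
    (l.foldl
      (fun (st : Int × String) item =>
        let result := st.2 ++ item.1 ++ "\n"
        let total_sum := st.1 + item.2
        (total_sum,
          result ++ "Сумма покупок в корзине составляет: " ++ PySem.Int.toStr total_sum ++ " BYN" ++ "\n"))
      (t, r)).2 = r ++ String.join ((l.zip (pvTotals l t)).map pvBlock) := by
  induction l generalizing t r with
  | nil => simp [String.join]
  | cons hd tl ih =>
      cases hd with
      | mk name amount =>
        simp only [List.foldl_cons, pvTotals, List.zip_cons_cons, List.map_cons]
        rw [ih, join_cons]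
        simp [pvBlock, String.append_assoc]

-- ===== VERDICT (by name: the statement is the Claim_ definition above) =====
theorem summ_guide_spec : Claim_equal_summ_guide := by
  intro l _
  unfold Spec_summ_guide summ_guide summ_guide_alt
  rw [summ_guide_loop]
  simp
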